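-- pv_equiv track=rewrite | github.com/PinsaraPerera/IEEEXtreame_18.0_Team_Vertex | halving_py.py | backtrack
-- ===== SOURCE A (Python) =====
-- MOD = 998244353
--
-- def is_valid_assignment(C, R, B, N):
--     for i in range(N):
--         a1 = C[2 * i]
--         a2 = C[2 * i + 1]
--         if R[i] == 0:  # We expect min(a1, a2) == B[i]
--             if min(a1, a2) != B[i]:
--                 return False
--         else:  # We expect max(a1, a2) == B[i]
--             if max(a1, a2) != B[i]:
--                 return False
--     return True
--
-- def backtrack(C, R, B, available, idx, N):
--     if idx == len(C):  # Base case: all values assigned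
--         if is_valid_assignment(C, R, B, N):
--             return 1
--         return 0
--
--     if C[idx] != -1:  # Skip already assigned values
--         return backtrack(C, R, B, available, idx + 1, N)
--
--     count = 0
--     for num in available:
--         new_C = C[:]  # Copy the current state
--         new_C[idx] = num  # Assign the number
--         new_available = available - {num}  # Remove this number from the available set
--         count = (count + backtrack(new_C, R, B, new_available, idx + 1, N)) % MOD
--
--     return count
-- ===== SOURCE B (Python) =====
-- MOD = 998244353
--
-- def _arrangements(pool, k):
--     # all ways to pick k distinct elements of pool, in order
--     if k == 0:
--         return [[]]
--     out = []
--     for j in range(len(pool)):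
--         for rest in _arrangements(pool[:j] + pool[j + 1:], k - 1):
--             out.append([pool[j]] + rest)
--     return out
--
-- def _fill(C, ps, vs):
--     filled = list(C)
--     for p, v in zip(ps, vs):
--         filled[p] = v
--     return filled
--
-- def _pairs_ok(C, R, B, N):
--     return all((min(C[2 * i], C[2 * i + 1]) if R[i] == 0
--                 else max(C[2 * i], C[2 * i + 1])) == B[i]
--                for i in range(N))
--
-- def backtrack(C, R, B, available, idx, N):
--     free = [i for i in range(len(C)) if i >= idx and C[i] == -1]
--     total = 0
--     for vals in _arrangements(list(available), len(free)):
--         if _pairs_ok(_fill(C, free, vals), R, B, N):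
--             total += 1
--     return total % MOD
-- ===== Notes on version B (the rewrite author's own statement) =====
-- stated objective: alternative
-- what changed: Replaced the recursive backtracking search (which copies C and rebuilds a shrinking set at every node) with a flat generate-and-count: compute the list of free slots once, enumerate the arrangements of the available values, and count those whose one-shot filling passes the per-pair min/max check.
-- outside the precondition, e.g. on backtrack([-1, -1], [], [], {2, -1}, -1, 0): A returns 1, B returns 2; on backtrack([-1, 0], [1], [5], {1}, 0, 2): A returns 0, B returns 0
import Mathlib
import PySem

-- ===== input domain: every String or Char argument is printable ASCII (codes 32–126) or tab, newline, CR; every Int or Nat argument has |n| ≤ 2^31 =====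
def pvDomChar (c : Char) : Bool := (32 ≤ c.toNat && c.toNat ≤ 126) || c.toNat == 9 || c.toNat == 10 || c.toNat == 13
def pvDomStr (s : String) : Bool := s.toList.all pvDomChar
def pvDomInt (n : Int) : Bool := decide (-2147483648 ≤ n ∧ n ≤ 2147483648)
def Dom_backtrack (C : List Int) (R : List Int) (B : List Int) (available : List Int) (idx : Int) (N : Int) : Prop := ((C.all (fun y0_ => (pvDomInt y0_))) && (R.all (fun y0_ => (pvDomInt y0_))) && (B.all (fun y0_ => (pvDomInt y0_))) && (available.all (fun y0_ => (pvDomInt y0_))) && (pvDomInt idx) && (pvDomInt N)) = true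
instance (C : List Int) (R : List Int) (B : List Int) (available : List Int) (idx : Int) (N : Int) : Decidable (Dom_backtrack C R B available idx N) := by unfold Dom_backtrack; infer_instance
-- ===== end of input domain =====

-- B replaces A's recursive backtracking search (which copies C and rebuilds a shrinking set at
-- every node) by a flat generate-and-count over the arrangements of the available values
-- ("alternative" objective: a genuinely different algorithm of similar cost, not claimed faster).

-- ===== PORT A =====
-- termination helper for the port's recursion (cited in decreasing_by)
theorem pvGetSomeLt {α : Type} (xs : List α) (i : Int) (c : α)
    (h : PySem.List.pyGet? xs i = some c) : i < (xs.length : Int) := by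
  unfold PySem.List.pyGet? PySem.List.pyIdx? at h
  split_ifs at h <;> simp_all <;> try omega

def isValidGo (C R B : List Int) : List Int → Bool
  | [] => true
  | i :: rest =>
    match PySem.List.pyGet? C (2*i), PySem.List.pyGet? C (2*i+1),
          PySem.List.pyGet? R i, PySem.List.pyGet? B i with
    | some a1, some a2, some r, some b =>
        if r = 0 then (if min a1 a2 ≠ b then false else isValidGo C R B rest)
        else (if max a1 a2 ≠ b then false else isValidGo C R B rest)
    | _, _, _, _ => false   -- Python raises IndexError here (excluded by Pre_)

def is_valid_assignment (C R B : List Int) (N : Int) : Bool :=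
  isValidGo C R B (PySem.List.pyRange 0 N 1)

def backtrack (C : List Int) (R : List Int) (B : List Int) (available : List Int) (idx : Int) (N : Int) : Int :=
  if idx = (C.length : Int) then
    (if is_valid_assignment C R B N then 1 else 0)
  else
    match h : PySem.List.pyGet? C idx with
    | none => 0   -- Python raises IndexError here (excluded by Pre_)
    | some c =>
      if c ≠ -1 then backtrack C R B available (idx + 1) N
      else
        available.foldl
          (fun count num =>
            PySem.Int.mod
              (count + backtrack (PySem.List.pySetD C idx num) R B
                (PySem.Set.diff available [num]) (idx + 1) N) 998244353)
          0
termination_by ((C.length : Int) - idx).toNat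
decreasing_by
  · have := pvGetSomeLt C idx c h; omega
  · have hl := PySem.List.length_pySetD C idx num
    simp only [hl]
    have := pvGetSomeLt C idx c h
    omega

-- ===== PORT B =====
def arrangementsB (pool : List Int) : Nat → List (List Int)
  | 0 => [[]]
  | k+1 => (List.range pool.length).flatMap (fun j =>
      (arrangementsB (pool.take j ++ pool.drop (j+1)) k).map
        (fun rest => pool.getD j 0 :: rest))

def pyFill (C : List Int) (ps : List Nat) (vs : List Int) : List Int :=
  (ps.zip vs).foldl (fun c pv => c.set pv.1 pv.2) C

def pairsOk (C R B : List Int) (N : Int) : Bool :=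
  (PySem.List.pyRange 0 N 1).all (fun i =>
    match PySem.List.pyGet? C (2*i), PySem.List.pyGet? C (2*i+1),
          PySem.List.pyGet? R i, PySem.List.pyGet? B i with
    | some a1, some a2, some r, some b => (if r = 0 then min a1 a2 else max a1 a2) == b
    | _, _, _, _ => false)

def freeSlots (C : List Int) (idx : Int) : List Nat :=
  (List.range C.length).filter (fun i : Nat => decide (idx ≤ (i : Int)) && (C.getD i 0 == -1))

def backtrack_alt (C : List Int) (R : List Int) (B : List Int) (available : List Int) (idx : Int) (N : Int) : Int :=
  let free := freeSlots C idx
  PySem.Int.mod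
    ((arrangementsB available free.length).foldl
      (fun total vals => if pairsOk (pyFill C free vals) R B N then total + 1 else total) 0)
    998244353

-- ===== PRECONDITION & SPEC =====
-- Pre_ admits the inputs on which the Python A returns: idx within Python's index range for C,
-- and — whenever some branch reaches the validity check (i.e. the free slots can all be filled
-- from `available`) — either N small enough that C[2i+1], R[i], B[i] stay in range, or some
-- earlier pair whose fixed slots already force its min/max constraint to fail (then every branch of A
-- returns False before the out-of-range access); outside that A raises IndexError — except
-- that this clause is conservative: when an early constraint fails only thanks to the values
-- filled into free slots, A still returns 0 (so does B) but the input is excluded.  Two further exclusions: `available` must be duplicate-free (it is a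
-- Python set, so every real input satisfies this), and the corner 'idx < 0 with -1 ∈ available
-- and a free slot among the wrapped-around positions (when the free slots can all be filled)'
-- is excluded because there Python's
-- negative-index wraparound lets A fill that slot twice (first with the sentinel -1), a
-- collision between the 'unassigned' marker and a value that no caller intends and that B,
-- filling each free slot once, does not reproduce.
def Pre_backtrack (C : List Int) (R : List Int) (B : List Int) (available : List Int) (idx : Int) (N : Int) : Prop :=
  available.Nodup ∧
  -(C.length : Int) ≤ idx ∧ idx ≤ (C.length : Int) ∧
  (idx < 0 → ((-1 : Int) ∉ available ∨
    (∀ j : Nat, j < C.length → (C.length : Int) + idx ≤ (j : Int) → C.getD j 0 ≠ -1) ∨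
    available.length <
      ((List.range C.length).filter
        (fun i : Nat => decide (idx ≤ (i : Int)) && (C.getD i 0 == -1))).length)) ∧
  ((0 < N ∧ (2*N > (C.length : Int) ∨ N > (R.length : Int) ∨ N > (B.length : Int))) →
    ((available.length : Int) <
      (((List.range C.length).filter
          (fun i : Nat => decide (idx ≤ (i : Int)) && (C.getD i 0 == -1))).length : Int) ∨
     ∃ i : Nat, i < R.length ∧ (i : Int) < N ∧ 2*i+1 < C.length ∧ i < B.length ∧
       ((R.getD i 0 = 0 ∧
          ((C.getD (2*i) 0 ≠ -1 ∧ C.getD (2*i+1) 0 ≠ -1 ∧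
             min (C.getD (2*i) 0) (C.getD (2*i+1) 0) ≠ B.getD i 0) ∨
           (C.getD (2*i) 0 ≠ -1 ∧ C.getD (2*i) 0 < B.getD i 0) ∨
           (C.getD (2*i+1) 0 ≠ -1 ∧ C.getD (2*i+1) 0 < B.getD i 0))) ∨
        (R.getD i 0 ≠ 0 ∧
          ((C.getD (2*i) 0 ≠ -1 ∧ C.getD (2*i+1) 0 ≠ -1 ∧
             max (C.getD (2*i) 0) (C.getD (2*i+1) 0) ≠ B.getD i 0) ∨
           (C.getD (2*i) 0 ≠ -1 ∧ C.getD (2*i) 0 > B.getD i 0) ∨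
           (C.getD (2*i+1) 0 ≠ -1 ∧ C.getD (2*i+1) 0 > B.getD i 0))))))

instance (C : List Int) (R : List Int) (B : List Int) (available : List Int) (idx : Int) (N : Int) : Decidable (Pre_backtrack C R B available idx N) := by
  unfold Pre_backtrack
  refine @instDecidableAnd _ _ ?_ (@instDecidableAnd _ _ ?_ (@instDecidableAnd _ _ ?_
    (@instDecidableAnd _ _ ?_ ?_))) <;> infer_instance

def pvWitness_backtrack : List Int × List Int × List Int × List Int × Int × Int :=
  ([-1, -1], [0], [1], [1, 2], 0, 1)

def Spec_backtrack (C : List Int) (R : List Int) (B : List Int) (available : List Int) (idx : Int) (N : Int) (out : Int) : Prop := out = backtrack_alt C R B available idx N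
instance (C : List Int) (R : List Int) (B : List Int) (available : List Int) (idx : Int) (N : Int) (out : Int) : Decidable (Spec_backtrack C R B available idx N out) := by unfold Spec_backtrack; infer_instance

-- ===== CLAIM (what is proved, stated in full; the proofs are below) =====
def Claim_equal_backtrack : Prop := ∀ (C : List Int) (R : List Int) (B : List Int) (available : List Int) (idx : Int) (N : Int), Dom_backtrack C R B available idx N → Pre_backtrack C R B available idx N → Spec_backtrack C R B available idx N (backtrack C R B available idx N)

-- ===== LEMMAS AND PROOFS =====

-- the common counting spec: number of ways to fill the slots `ps` (in order) with pairwise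
-- distinct values from `avail` so that the filled list passes A's validity check
def cnt (R B : List Int) (N : Int) : List Int → List Nat → List Int → Nat
  | C, [], _ => if is_valid_assignment C R B N then 1 else 0
  | C, p :: ps, avail => (avail.map (fun v => cnt R B N (C.set p v) ps (avail.erase v))).sum

lemma pvSumMapAdd {α : Type} (l : List α) (f g : α → Nat) :
    (l.map (fun x => f x + g x)).sum = (l.map f).sum + (l.map g).sum := by
  induction l with
  | nil => simp
  | cons a t ih => simp [ih]; omega

lemma pvSumSwap (f : Int → Int → Nat) :
    ∀ (L : List Int), L.Nodup →
      ((L.map (fun u => ((L.erase u).map (fun v => f u v)).sum)).sum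
        = (L.map (fun v => ((L.erase v).map (fun u => f u v)).sum)).sum) := by
  intro L h
  induction L with
  | nil => simp
  | cons a t ih =>
    obtain ⟨ha, ht⟩ := List.nodup_cons.mp h
    have herase : ∀ u ∈ t, (a :: t).erase u = a :: t.erase u := fun u hu =>
      List.erase_cons_tail (by simp; rintro rfl; exact ha hu)
    have e1 : (t.map (fun u => (((a :: t).erase u).map (fun v => f u v)).sum))
        = t.map (fun u => f u a + ((t.erase u).map (fun v => f u v)).sum) :=
      List.map_congr_left (fun u hu => by rw [herase u hu]; simp)
    have e2 : (t.map (fun v => (((a :: t).erase v).map (fun u => f u v)).sum))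
        = t.map (fun v => f a v + ((t.erase v).map (fun u => f u v)).sum) :=
      List.map_congr_left (fun v hv => by rw [herase v hv]; simp)
    simp only [List.map_cons, List.sum_cons, List.erase_cons_head, e1, e2,
      pvSumMapAdd, ih ht]
    rw [show (List.map (fun v => f a v) t) = List.map (f a) t from rfl]
    omega

lemma pvCntPerm (R B : List Int) (N : Int) :
    ∀ {ps ps' : List Nat}, ps.Perm ps' → ps.Nodup →
      ∀ (C avail : List Int), avail.Nodup →
        cnt R B N C ps avail = cnt R B N C ps' avail := by
  intro ps ps' hperm
  induction hperm with
  | nil => intro _ C avail _; rfl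
  | cons x h ih =>
    intro hnd C avail hav
    obtain ⟨_, ht⟩ := List.nodup_cons.mp hnd
    simp only [cnt]
    exact congrArg List.sum (List.map_congr_left fun v _ =>
      ih ht (C.set x v) (avail.erase v) (hav.erase v))
  | swap x y l =>
    intro hnd C avail hav
    obtain ⟨hy, hnd2⟩ := List.nodup_cons.mp hnd
    obtain ⟨_, _⟩ := List.nodup_cons.mp hnd2
    have hxy : y ≠ x := by intro e; subst e; exact hy List.mem_cons_self
    simp only [cnt]
    rw [pvSumSwap (fun u v => cnt R B N ((C.set y u).set x v) l ((avail.erase u).erase v))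
      avail hav]
    apply congrArg List.sum
    apply List.map_congr_left
    intro v _
    apply congrArg List.sum
    apply List.map_congr_left
    intro u _
    rw [List.set_comm u v hxy, List.erase_comm]
  | trans h1 _ ih1 ih2 =>
    intro hnd C avail hav
    rw [ih1 hnd C avail hav, ih2 ((h1.nodup_iff).mp hnd) C avail hav]

lemma pvCntPick (R B : List Int) (N : Int) (C : List Int) (ps : List Nat) (avail : List Int)
    (p : Nat) (hp : p ∈ ps) (hnd : ps.Nodup) (hna : avail.Nodup) :
    cnt R B N C ps avail
      = (avail.map (fun v => cnt R B N (C.set p v) (ps.erase p) (avail.erase v))).sum := by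
  rw [pvCntPerm R B N (List.perm_cons_erase hp) hnd C avail hna]
  rfl

lemma pvFreeNodup (C : List Int) (idx : Int) : (freeSlots C idx).Nodup :=
  (List.nodup_range).filter _

lemma pvFreeSkip (C : List Int) (idx : Int) (p : Nat) (hpn : p < C.length)
    (hc : ¬ C.getD p 0 = -1)
    (hcase : (0 ≤ idx ∧ p = idx.toNat) ∨ (idx < 0)) :
    freeSlots C (idx + 1) = freeSlots C idx := by
  unfold freeSlots
  apply List.filter_congr
  intro i hi
  have hi' := List.mem_range.mp hi
  by_cases hip : i = p
  · subst hip
    have hfalse : (C.getD i 0 == -1) = false := beq_eq_false_iff_ne.mpr hc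
    rw [hfalse]
    simp
  · have hiff : decide ((idx + 1) ≤ (i : Int)) = decide (idx ≤ (i : Int)) := by
      rw [decide_eq_decide]
      rcases hcase with ⟨h0, rfl⟩ | hneg <;> omega
    rw [hiff]

lemma pvFreeSet (C : List Int) (idx : Int) (p : Nat) (v : Int) (hpn : p < C.length)
    (hcase : (0 ≤ idx ∧ p = idx.toNat) ∨ (idx < 0 ∧ v ≠ -1)) :
    freeSlots (C.set p v) (idx + 1) = (freeSlots C idx).erase p := by
  rw [List.Nodup.erase_eq_filter (pvFreeNodup C idx) p]
  unfold freeSlots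
  rw [List.filter_filter]
  simp only [List.length_set]
  apply List.filter_congr
  intro i hi
  have hi' := List.mem_range.mp hi
  by_cases hip : i = p
  · subst hip
    have hset : (C.set i v).getD i 0 = v := by
      rw [List.getD_eq_getElem?_getD, List.getElem?_set]
      simp [hpn]
    rcases hcase with ⟨h0, rfl⟩ | ⟨hneg, hv⟩
    · have hlt : ¬ ((idx + 1) ≤ ((idx.toNat : Nat) : Int)) := by omega
      rw [decide_eq_false hlt]
      simp
    · have hvf : (v == -1) = false := beq_eq_false_iff_ne.mpr hv
      rw [hset, hvf]
      simp
  · have hset : (C.set p v).getD i 0 = C.getD i 0 := by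
      rw [List.getD_eq_getElem?_getD, List.getD_eq_getElem?_getD, List.getElem?_set]
      simp [Ne.symm hip]
    have hiff : decide ((idx + 1) ≤ (i : Int)) = decide (idx ≤ (i : Int)) := by
      rw [decide_eq_decide]
      rcases hcase with ⟨h0, rfl⟩ | ⟨hneg, _⟩ <;> omega
    have hne : (i != p) = true := by simp [hip]
    rw [hset, hiff, hne]
    simp

lemma pvFoldMod (g : Int → Int) :
    ∀ (L : List Int) (s : Int),
      L.foldl (fun c v => PySem.Int.mod (c + PySem.Int.mod (g v) 998244353) 998244353)
          (PySem.Int.mod s 998244353)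
        = PySem.Int.mod (s + (L.map g).sum) 998244353 := by
  intro L
  induction L with
  | nil => intro s; simp
  | cons a t ih =>
    intro s
    simp only [List.foldl_cons, List.map_cons, List.sum_cons]
    have h1 : PySem.Int.mod (PySem.Int.mod s 998244353 + PySem.Int.mod (g a) 998244353) 998244353
        = PySem.Int.mod (s + g a) 998244353 := by
      rw [PySem.Int.mod_eq_emod_of_pos (by norm_num), PySem.Int.mod_eq_emod_of_pos (by norm_num),
          PySem.Int.mod_eq_emod_of_pos (by norm_num), PySem.Int.mod_eq_emod_of_pos (by norm_num)]
      omega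
    rw [h1, ih (s + g a), add_assoc]

lemma pvDiffSingleton (avail : List Int) (v : Int) (hnd : avail.Nodup) :
    PySem.Set.diff avail [v] = avail.erase v := by
  unfold PySem.Set.diff PySem.Set.contains
  rw [List.Nodup.erase_eq_filter hnd v]
  apply List.filter_congr
  intro x _
  by_cases hx : x = v <;> simp [hx]

lemma pvFreeAtLen (C : List Int) : freeSlots C (C.length : Int) = [] := by
  unfold freeSlots
  rw [List.filter_eq_nil_iff]
  intro i hi
  have := List.mem_range.mp hi
  simp only [Bool.and_eq_true, decide_eq_true_eq]
  rintro ⟨h, _⟩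
  omega

lemma pvFreeNeg (C : List Int) (idx : Int) (hneg : idx < 0) :
    freeSlots C (idx + 1) = freeSlots C idx := by
  unfold freeSlots
  apply List.filter_congr
  intro i _
  have hiff : decide ((idx + 1) ≤ (i : Int)) = decide (idx ≤ (i : Int)) := by
    rw [decide_eq_decide]
    omega
  rw [hiff]

lemma pvSetSelf (C : List Int) (p : Nat) (hp : p < C.length) (h : C.getD p 0 = -1) :
    C.set p (-1) = C := by
  have hg : C[p] = -1 := by
    rwa [List.getD_eq_getElem?_getD, List.getElem?_eq_getElem hp] at h
  calc C.set p (-1) = C.set p (C[p]'hp) := by rw [hg]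
    _ = C := List.set_getElem_self hp

lemma pvCntZero (R B : List Int) (N : Int) :
    ∀ (ps : List Nat) (C avail : List Int), avail.length < ps.length →
      cnt R B N C ps avail = 0 := by
  intro ps
  induction ps with
  | nil => intro C avail h; exact absurd h (by simp)
  | cons p ps ih =>
    intro C avail h
    simp only [cnt]
    apply List.sum_eq_zero
    intro x hx
    obtain ⟨v, hv, rfl⟩ := List.mem_map.mp hx
    have hav1 := List.length_pos_of_mem hv
    apply ih
    rw [List.length_erase_of_mem hv]
    simp only [List.length_cons] at h
    omega

lemma pvFoldZero : ∀ (L : List Int),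
    L.foldl (fun acc (_ : Int) => PySem.Int.mod (acc + 0) 998244353) 0 = 0 := by
  intro L
  induction L with
  | nil => rfl
  | cons a t ih =>
    have h0 : PySem.Int.mod ((0 : Int) + 0) 998244353 = 0 := by
      rw [PySem.Int.mod_eq_emod_of_pos (by norm_num)]
      norm_num
    simp only [List.foldl_cons, h0]
    exact ih

lemma pvBtABase (R B : List Int) (N : Int) (C avail : List Int) :
    backtrack C R B avail (C.length : Int) N
      = PySem.Int.mod ((cnt R B N C (freeSlots C (C.length : Int)) avail : Nat) : Int) 998244353 := by
  rw [pvFreeAtLen, backtrack.eq_def, if_pos rfl]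
  simp only [cnt]
  split <;> rw [PySem.Int.mod_eq_emod_of_pos (by norm_num)] <;> decide

lemma pvBtAEq (R B : List Int) (N : Int) :
    ∀ (k : Nat) (C avail : List Int) (idx : Int),
      ((C.length : Int) - idx).toNat ≤ k → avail.Nodup →
      -(C.length : Int) ≤ idx → idx ≤ (C.length : Int) →
      (idx < 0 → ((-1 : Int) ∉ avail ∨
        ∀ j : Nat, j < C.length → (C.length : Int) + idx ≤ (j : Int) → C.getD j 0 ≠ -1)) →
      backtrack C R B avail idx N
        = PySem.Int.mod ((cnt R B N C (freeSlots C idx) avail : Nat) : Int) 998244353 := by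
  intro k
  induction k with
  | zero =>
    intro C avail idx hk _ _ h2 _
    have hidx : idx = (C.length : Int) := by omega
    rw [hidx]
    exact pvBtABase R B N C avail
  | succ k ih =>
    intro C avail idx hk hnd h1 h2 h3
    by_cases hidx : idx = (C.length : Int)
    · rw [hidx]; exact pvBtABase R B N C avail
    have hlt : idx < (C.length : Int) := lt_of_le_of_ne h2 hidx
    set p : Nat := if 0 ≤ idx then idx.toNat else C.length - (-idx).toNat with hpdef
    have hpn : p < C.length := by rw [hpdef]; split_ifs <;> omega
    have hple : idx ≤ (p : Int) := by rw [hpdef]; split_ifs <;> omega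
    have hp0 : 0 ≤ idx → p = idx.toNat := by intro h; rw [hpdef, if_pos h]
    have hpidx : PySem.List.pyIdx? C.length idx = some p := by
      unfold PySem.List.pyIdx?
      rw [hpdef]
      split_ifs <;> first | rfl | (exfalso; omega)
    have hget : PySem.List.pyGet? C idx = some (C.getD p 0) := by
      unfold PySem.List.pyGet?
      rw [hpidx, Option.bind_some, List.getElem?_eq_getElem hpn,
          List.getD_eq_getElem?_getD, List.getElem?_eq_getElem hpn]
      rfl
    rw [backtrack.eq_def, if_neg hidx]
    split
    · rename_i h
      rw [hget] at h
      exact absurd h (by simp)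
    rename_i c h
    rw [hget] at h
    obtain rfl : c = C.getD p 0 := (Option.some.inj h).symm
    by_cases hc : C.getD p 0 = -1
    · rw [if_neg (not_not_intro hc)]
      have hna : idx < 0 → (-1 : Int) ∉ avail := by
        intro hneg
        rcases h3 hneg with hna | hall
        · exact hna
        · exact absurd hc (hall p hpn (by rw [hpdef, if_neg (by omega)]; omega))
      have hmem : p ∈ freeSlots C idx :=
        List.mem_filter.mpr ⟨List.mem_range.mpr hpn, by
          simp only [Bool.and_eq_true, decide_eq_true_eq, beq_iff_eq]
          exact ⟨hple, hc⟩⟩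
      have hcongr : ∀ (acc : Int), ∀ num ∈ avail,
          PySem.Int.mod (acc + backtrack (PySem.List.pySetD C idx num) R B
            (PySem.Set.diff avail [num]) (idx + 1) N) 998244353
          = PySem.Int.mod (acc + PySem.Int.mod
              ((cnt R B N (C.set p num) ((freeSlots C idx).erase p) (avail.erase num) : Nat) : Int)
              998244353) 998244353 := by
        intro acc num hnum
        have hsetD : PySem.List.pySetD C idx num = C.set p num := by
          unfold PySem.List.pySetD PySem.List.pySet?
          rw [hpidx]
          rfl
        have hdiff : PySem.Set.diff avail [num] = avail.erase num := pvDiffSingleton avail num hnd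
        have hfs : freeSlots (C.set p num) (idx + 1) = (freeSlots C idx).erase p := by
          apply pvFreeSet C idx p num hpn
          by_cases hs : 0 ≤ idx
          · exact Or.inl ⟨hs, hp0 hs⟩
          · exact Or.inr ⟨by omega, fun e => hna (by omega) (e ▸ hnum)⟩
        rw [hsetD, hdiff,
            ih (C.set p num) (avail.erase num) (idx + 1)
              (by rw [List.length_set]; omega) (hnd.erase num)
              (by rw [List.length_set]; omega)
              (by rw [List.length_set]; omega)
              (fun hneg => Or.inl (fun hm => hna (by omega) (List.mem_of_mem_erase hm))),
            hfs]
      rw [PySem.List.foldl_congr_mem avail _ _ 0 hcongr,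
          show (0 : Int) = PySem.Int.mod 0 998244353 from by
            rw [PySem.Int.mod_eq_emod_of_pos (by norm_num)]
            norm_num,
          pvFoldMod (fun num =>
            ((cnt R B N (C.set p num) ((freeSlots C idx).erase p) (avail.erase num) : Nat) : Int))
            avail 0,
          pvCntPick R B N C (freeSlots C idx) avail p hmem (pvFreeNodup C idx) hnd,
          Nat.cast_list_sum, List.map_map, zero_add]
      rfl
    · rw [if_pos hc]
      rw [ih C avail (idx + 1) (by omega) hnd (by omega) (by omega)
            (fun hneg => (h3 (by omega)).imp id
              (fun hall j hj hle => hall j hj (by omega))),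
          pvFreeSkip C idx p hpn hc
            (by by_cases hs : 0 ≤ idx
                · exact Or.inl ⟨hs, hp0 hs⟩
                · exact Or.inr (by omega))]

lemma pvBtAZero (R B : List Int) (N : Int) :
    ∀ (k : Nat) (C avail : List Int) (idx : Int),
      ((C.length : Int) - idx).toNat ≤ k → avail.Nodup →
      -(C.length : Int) ≤ idx → idx ≤ (C.length : Int) →
      avail.length < (freeSlots C idx).length →
      backtrack C R B avail idx N = 0 := by
  intro k
  induction k with
  | zero =>
    intro C avail idx hk _ _ h2 hsz
    have hidx : idx = (C.length : Int) := by omega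
    rw [hidx, pvFreeAtLen] at hsz
    exact absurd hsz (by simp)
  | succ k ih =>
    intro C avail idx hk hnd h1 h2 hsz
    by_cases hidx : idx = (C.length : Int)
    · rw [hidx, pvFreeAtLen] at hsz
      exact absurd hsz (by simp)
    have hlt : idx < (C.length : Int) := lt_of_le_of_ne h2 hidx
    set p : Nat := if 0 ≤ idx then idx.toNat else C.length - (-idx).toNat with hpdef
    have hpn : p < C.length := by rw [hpdef]; split_ifs <;> omega
    have hple : idx ≤ (p : Int) := by rw [hpdef]; split_ifs <;> omega
    have hp0 : 0 ≤ idx → p = idx.toNat := by intro h; rw [hpdef, if_pos h]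
    have hpidx : PySem.List.pyIdx? C.length idx = some p := by
      unfold PySem.List.pyIdx?
      rw [hpdef]
      split_ifs <;> first | rfl | (exfalso; omega)
    have hget : PySem.List.pyGet? C idx = some (C.getD p 0) := by
      unfold PySem.List.pyGet?
      rw [hpidx, Option.bind_some, List.getElem?_eq_getElem hpn,
          List.getD_eq_getElem?_getD, List.getElem?_eq_getElem hpn]
      rfl
    rw [backtrack.eq_def, if_neg hidx]
    split
    · rename_i h
      rw [hget] at h
    rename_i c h
    rw [hget] at h
    obtain rfl : c = C.getD p 0 := (Option.some.inj h).symm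
    by_cases hc : C.getD p 0 = -1
    · rw [if_neg (not_not_intro hc)]
      have hmem : p ∈ freeSlots C idx :=
        List.mem_filter.mpr ⟨List.mem_range.mpr hpn, by
          simp only [Bool.and_eq_true, decide_eq_true_eq, beq_iff_eq]
          exact ⟨hple, hc⟩⟩
      have hcongr : ∀ (acc : Int), ∀ num ∈ avail,
          PySem.Int.mod (acc + backtrack (PySem.List.pySetD C idx num) R B
            (PySem.Set.diff avail [num]) (idx + 1) N) 998244353
          = PySem.Int.mod (acc + 0) 998244353 := by
        intro acc num hnum
        have hav1 : 0 < avail.length := List.length_pos_of_mem hnum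
        have hsetD : PySem.List.pySetD C idx num = C.set p num := by
          unfold PySem.List.pySetD PySem.List.pySet?
          rw [hpidx]
          rfl
        have hflen : (freeSlots C idx).length - 1 ≤ (freeSlots (C.set p num) (idx + 1)).length := by
          by_cases hs : 0 ≤ idx
          · rw [pvFreeSet C idx p num hpn (Or.inl ⟨hs, hp0 hs⟩),
                List.length_erase_of_mem hmem]
          · by_cases hv : num = -1
            · subst hv
              rw [pvSetSelf C p hpn hc, pvFreeNeg C idx (by omega)]
              omega
            · rw [pvFreeSet C idx p num hpn (Or.inr ⟨by omega, hv⟩),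
                  List.length_erase_of_mem hmem]
        rw [hsetD, pvDiffSingleton avail num hnd,
            ih (C.set p num) (avail.erase num) (idx + 1)
              (by rw [List.length_set]; omega) (hnd.erase num)
              (by rw [List.length_set]; omega)
              (by rw [List.length_set]; omega)
              (by rw [List.length_erase_of_mem hnum]; omega)]
      rw [PySem.List.foldl_congr_mem avail _ _ 0 hcongr]
      exact pvFoldZero avail
    · rw [if_pos hc]
      exact ih C avail (idx + 1) (by omega) hnd (by omega) (by omega)
        (by rwa [pvFreeSkip C idx p hpn hc
          (by by_cases hs : 0 ≤ idx
              · exact Or.inl ⟨hs, hp0 hs⟩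
              · exact Or.inr (by omega))])

lemma pvPairsOkEq (C R B : List Int) (N : Int) :
    pairsOk C R B N = is_valid_assignment C R B N := by
  unfold pairsOk is_valid_assignment
  generalize (PySem.List.pyRange 0 N 1) = l
  induction l with
  | nil => simp [isValidGo]
  | cons i rest ih =>
    simp only [List.all_cons, isValidGo]
    cases h1 : PySem.List.pyGet? C (2*i) <;>
      cases h2 : PySem.List.pyGet? C (2*i+1) <;>
        cases h3 : PySem.List.pyGet? R i <;>
          cases h4 : PySem.List.pyGet? B i <;>
            simp only [Bool.false_and] <;> try rfl
    rename_i a1 a2 r b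
    rw [← ih]
    by_cases hr : r = 0
    · by_cases hm : min a1 a2 = b <;> simp [hr, hm]
    · by_cases hm : max a1 a2 = b <;> simp [hr, hm]

lemma pvSumIdx :
    ∀ (pool : List Int), pool.Nodup → ∀ (g : Int → List Int → Nat),
      ((List.range pool.length).map
          (fun j => g (pool.getD j 0) (pool.take j ++ pool.drop (j+1)))).sum
        = (pool.map (fun v => g v (pool.erase v))).sum := by
  intro pool
  induction pool with
  | nil => intro _ g; simp
  | cons a t ih =>
    intro hnd g
    obtain ⟨ha, ht⟩ := List.nodup_cons.mp hnd
    simp only [List.length_cons, List.range_succ_eq_map, List.map_cons, List.sum_cons,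
      List.erase_cons_head, List.getD_cons_zero, List.take_zero, List.nil_append,
      List.drop_succ_cons, List.drop_zero, List.map_map]
    have hcomp : (List.map ((fun j => g ((a :: t).getD j 0) ((a :: t).take j ++ t.drop j)) ∘ Nat.succ) (List.range t.length))
        = List.map (fun j => g (t.getD j 0) (a :: (t.take j ++ t.drop (j+1)))) (List.range t.length) := by
      apply List.map_congr_left
      intro j _
      simp [List.take_succ_cons]
    rw [hcomp, ih ht (fun v l => g v (a :: l))]
    congr 1
    apply congrArg List.sum
    apply List.map_congr_left
    intro v hv
    rw [List.erase_cons_tail (by simp; rintro rfl; exact ha hv)]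

lemma pvArrCnt (R B : List Int) (N : Int) :
    ∀ (ps : List Nat) (C pool : List Int), pool.Nodup →
      ((arrangementsB pool ps.length).countP
          (fun vs => is_valid_assignment (pyFill C ps vs) R B N))
        = cnt R B N C ps pool := by
  intro ps
  induction ps with
  | nil =>
    intro C pool _
    simp only [List.length_nil, arrangementsB, cnt]
    rw [List.countP_cons, List.countP_nil]
    simp only [Nat.zero_add]
    rfl
  | cons p ps ih =>
    intro C pool hnd
    simp only [List.length_cons]
    rw [arrangementsB, List.countP_flatMap]
    have hstep : ∀ j ∈ List.range pool.length,
        ((List.countP (fun vs => is_valid_assignment (pyFill C (p :: ps) vs) R B N)) ∘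
          (fun j => (arrangementsB (pool.take j ++ pool.drop (j+1)) ps.length).map
            (fun rest => pool.getD j 0 :: rest))) j
          = (fun j => cnt R B N (C.set p (pool.getD j 0)) ps (pool.take j ++ pool.drop (j+1))) j := by
      intro j _
      have hsub : (pool.take j ++ pool.drop (j+1)).Nodup := by
        rw [← List.eraseIdx_eq_take_drop_succ]
        exact (List.eraseIdx_sublist pool j).nodup hnd
      simp only [Function.comp_apply, List.countP_map]
      rw [← ih (C.set p (pool.getD j 0)) _ hsub]
      rfl
    rw [List.map_congr_left hstep,
        pvSumIdx pool hnd (fun v rest => cnt R B N (C.set p v) ps rest)]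
    rfl

lemma pvBtBEq (R B : List Int) (N : Int) (C avail : List Int) (idx : Int) (hnd : avail.Nodup) :
    backtrack_alt C R B avail idx N
      = PySem.Int.mod ((cnt R B N C (freeSlots C idx) avail : Nat) : Int) 998244353 := by
  simp only [backtrack_alt]
  rw [PySem.List.foldl_count_if
      (fun vals => pairsOk (pyFill C (freeSlots C idx) vals) R B N)
      (arrangementsB avail (freeSlots C idx).length) 0]
  have hpred : (fun vals => pairsOk (pyFill C (freeSlots C idx) vals) R B N)
      = (fun vals => is_valid_assignment (pyFill C (freeSlots C idx) vals) R B N) :=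
    funext fun vals => pvPairsOkEq _ R B N
  rw [hpred, pvArrCnt R B N (freeSlots C idx) C avail hnd, zero_add]

-- ===== VERDICT (by name: the statement is the Claim_ definition above) =====
theorem backtrack_spec : Claim_equal_backtrack := by
  intro C R B avail idx N _hdom hpre
  obtain ⟨hnd, h1, h2, h3, _h4⟩ := hpre
  unfold Spec_backtrack
  by_cases hsz : avail.length < (freeSlots C idx).length
  · rw [pvBtAZero R B N (((C.length : Int) - idx).toNat) C avail idx le_rfl hnd h1 h2 hsz,
        pvBtBEq R B N C avail idx hnd,
        pvCntZero R B N (freeSlots C idx) C avail hsz]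
    rw [PySem.Int.mod_eq_emod_of_pos (by norm_num)]
    norm_num
  · have h3' : idx < 0 → ((-1 : Int) ∉ avail ∨
        ∀ j : Nat, j < C.length → (C.length : Int) + idx ≤ (j : Int) → C.getD j 0 ≠ -1) := by
      intro hneg
      rcases h3 hneg with hna | hall | hszc
      · exact Or.inl hna
      · exact Or.inr hall
      · exact absurd hszc hsz
    rw [pvBtAEq R B N (((C.length : Int) - idx).toNat) C avail idx le_rfl hnd h1 h2 h3',
        pvBtBEq R B N C avail idx hnd]
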